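-- pv_equiv track=rewrite | github.com/IngRobertFodor/PYTHON | pythonprogrammingexercises/exercise_18_buy_8_get_1_free.py | buy_eight_get_one_free
-- ===== SOURCE A (Python) =====
-- def buy_eight_get_one_free(my_quantity, my_product_price):
--     my_price_to_pay = 0
--     for my_quantity in range(1,my_quantity+1):
--         if my_quantity % 9 == 0:
--             my_price_to_pay = my_price_to_pay
--         else:
--             my_price_to_pay += my_product_price
--     return my_price_to_pay
-- ===== SOURCE B (Python) =====
-- def buy_eight_get_one_free(my_quantity, my_product_price):
--     q = my_quantity if my_quantity > 0 else 0
--     return (q - q // 9) * my_product_price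
-- ===== Notes on version B (the rewrite author's own statement) =====
-- stated objective: faster
-- what changed: Replaced the per-item loop with the closed form (q - q//9) * price, where q is clamped to 0 for non-positive quantities.
import Mathlib
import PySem

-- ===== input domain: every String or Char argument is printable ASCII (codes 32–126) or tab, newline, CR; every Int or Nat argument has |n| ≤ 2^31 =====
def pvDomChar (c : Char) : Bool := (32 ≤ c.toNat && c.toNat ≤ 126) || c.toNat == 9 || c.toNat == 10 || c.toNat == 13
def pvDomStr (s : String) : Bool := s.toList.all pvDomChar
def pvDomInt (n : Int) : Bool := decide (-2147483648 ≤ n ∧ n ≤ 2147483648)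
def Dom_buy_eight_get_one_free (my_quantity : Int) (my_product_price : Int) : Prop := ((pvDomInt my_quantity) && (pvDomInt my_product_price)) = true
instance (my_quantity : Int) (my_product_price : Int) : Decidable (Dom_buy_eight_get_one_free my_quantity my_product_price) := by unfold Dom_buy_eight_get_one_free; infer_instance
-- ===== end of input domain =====

-- B replaces A's per-item loop by the closed form (q - q//9) * price (asymptotically faster).


-- ===== PORT A =====
def buy_eight_get_one_free (my_quantity : Int) (my_product_price : Int) : Int :=
  (PySem.List.pyRange 1 (my_quantity + 1) 1).foldl
    (fun my_price_to_pay q =>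
      if PySem.Int.mod q 9 = 0 then my_price_to_pay else my_price_to_pay + my_product_price)
    0

-- ===== PORT B =====
def buy_eight_get_one_free_alt (my_quantity : Int) (my_product_price : Int) : Int :=
  let q := if my_quantity > 0 then my_quantity else 0
  (q - PySem.Int.floordiv q 9) * my_product_price

-- ===== PRECONDITION & SPEC =====
def Spec_buy_eight_get_one_free (my_quantity : Int) (my_product_price : Int) (out : Int) : Prop := out = buy_eight_get_one_free_alt my_quantity my_product_price
instance (my_quantity : Int) (my_product_price : Int) (out : Int) : Decidable (Spec_buy_eight_get_one_free my_quantity my_product_price out) := by unfold Spec_buy_eight_get_one_free; infer_instance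

-- ===== CLAIM (what is proved, stated in full; the proofs are below) =====
def Claim_equal_buy_eight_get_one_free : Prop := ∀ (my_quantity : Int) (my_product_price : Int), Dom_buy_eight_get_one_free my_quantity my_product_price → Spec_buy_eight_get_one_free my_quantity my_product_price (buy_eight_get_one_free my_quantity my_product_price)

-- ===== LEMMAS AND PROOFS =====

-- A's loop over 1..n computes the closed form, by induction on n.
theorem pv_loop_closed (p : Int) : ∀ n : Nat,
    (PySem.List.pyRange 1 ((n : Int) + 1) 1).foldl
      (fun acc q => if PySem.Int.mod q 9 = 0 then acc else acc + p) 0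
    = ((n : Int) - (n : Int) / 9) * p := by
  intro n
  induction n with
  | zero => simp [PySem.List.pyRange_one_eq_nil]
  | succ m ih =>
    have h : ((m : Int) + 1 + 1) = ((m : Int) + 1) + 1 := by ring
    rw [show ((m + 1 : Nat) : Int) = (m : Int) + 1 by push_cast; ring, h,
        PySem.List.pyRange_one_succ_right (by omega), List.foldl_append, ih]
    simp only [List.foldl_cons, List.foldl_nil]
    rw [PySem.Int.mod_eq_emod_of_pos (by norm_num)]
    by_cases hm : ((m : Int) + 1) % 9 = 0
    · simp only [hm, if_pos]
      have : ((m : Int) + 1) / 9 = (m : Int) / 9 + 1 := by omega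
      rw [this]; ring
    · rw [if_neg hm]
      have : ((m : Int) + 1) / 9 = (m : Int) / 9 := by omega
      rw [this]; ring

-- ===== VERDICT (by name: the statement is the Claim_ definition above) =====
theorem buy_eight_get_one_free_spec : Claim_equal_buy_eight_get_one_free := by
  intro q p _
  unfold Spec_buy_eight_get_one_free buy_eight_get_one_free buy_eight_get_one_free_alt
  by_cases hq : q > 0
  · simp only [if_pos hq]
    have hn : q = ((q.toNat : Int)) := by omega
    rw [hn, pv_loop_closed, PySem.Int.floordiv_eq_ediv_of_pos (by norm_num)]
  · simp only [if_neg hq]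
    rw [PySem.List.pyRange_one_eq_nil (by omega)]
    simp [PySem.Int.floordiv]
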